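-- pv_equiv track=rewrite | github.com/akhandsingh17/assignments | codingexercise/DivisibleBy4.py | DivisibleBy4
-- ===== SOURCE A (Python) =====
-- def DivisibleBy4(n):
--
--     cnt=0
--     lst=[]
--
--     while cnt<2:
--         rem=n%10
--         lst.append(str(rem))
--         cnt=cnt+1
--         n=n//10
--
--     lst.reverse()
--
--     if int(''.join(lst))%4==0:
--         return True
--     else:
--         return False
-- ===== SOURCE B (Python) =====
-- def DivisibleBy4(n):
--     # 100 is divisible by 4, so n is divisible by 4 iff its last two digits are;
--     # Python's floor modulo makes this exact for negative n too.
--     return n % 4 == 0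
-- ===== Notes on version B (the rewrite author's own statement) =====
-- stated objective: simpler
-- what changed: Replaces the digit-extraction loop, list reversal, string join and re-parse with the closed form n % 4 == 0, exact by the identity n % 100 = 10*(n//10%10) + n%10 and 4 | 100.
import Mathlib
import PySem

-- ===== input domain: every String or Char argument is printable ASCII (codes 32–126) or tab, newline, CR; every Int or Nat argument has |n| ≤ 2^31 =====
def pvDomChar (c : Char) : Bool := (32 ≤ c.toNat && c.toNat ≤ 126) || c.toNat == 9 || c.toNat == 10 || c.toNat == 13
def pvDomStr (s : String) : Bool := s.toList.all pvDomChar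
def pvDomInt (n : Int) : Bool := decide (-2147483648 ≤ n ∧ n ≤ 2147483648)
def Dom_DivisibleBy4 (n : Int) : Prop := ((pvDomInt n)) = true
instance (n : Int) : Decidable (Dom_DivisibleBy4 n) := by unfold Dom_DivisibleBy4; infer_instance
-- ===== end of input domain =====

-- B replaces A's two-digit extraction loop / string join / re-parse with the closed form n % 4 == 0 (simpler).


-- ===== PORT A =====
-- while cnt<2: two iterations over the state (lst, n); the int('' .join …) is
-- ported with ofStr? and .getD 0 — lst always holds two digit strings, so the
-- default branch is unreachable (A never raises).
def DivisibleBy4 (n : Int) : Bool :=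
  let st := (PySem.List.pyRange 0 2 1).foldl
      (fun (st : List String × Int) _ =>
        (st.1 ++ [PySem.Int.toStr (PySem.Int.mod st.2 10)], PySem.Int.floordiv st.2 10))
      ([], n)
  let lst := st.1.reverse
  if PySem.Int.mod ((PySem.Int.ofStr? (PySem.Str.join "" lst)).getD 0) 4 == 0 then true else false

-- ===== PORT B =====
def DivisibleBy4_alt (n : Int) : Bool := PySem.Int.mod n 4 == 0

-- ===== PRECONDITION & SPEC =====
def Spec_DivisibleBy4 (n : Int) (out : Bool) : Prop := out = DivisibleBy4_alt n
instance (n : Int) (out : Bool) : Decidable (Spec_DivisibleBy4 n out) := by unfold Spec_DivisibleBy4; infer_instance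

-- ===== CLAIM (what is proved, stated in full; the proofs are below) =====
def Claim_equal_DivisibleBy4 : Prop := ∀ (n : Int), Dom_DivisibleBy4 n → Spec_DivisibleBy4 n (DivisibleBy4 n)

-- ===== LEMMAS AND PROOFS =====

-- parsing the concatenation of two single-digit strings gives the two-digit number
set_option maxHeartbeats 4000000 in
theorem pv_parse_two (a b : Int) (ha0 : 0 ≤ a) (ha1 : a < 10) (hb0 : 0 ≤ b) (hb1 : b < 10) :
    (PySem.Int.ofStr? (PySem.Str.join "" [PySem.Int.toStr a, PySem.Int.toStr b])).getD 0
      = a * 10 + b := by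
  interval_cases a <;> interval_cases b <;> decide

-- ===== VERDICT (by name: the statement is the Claim_ definition above) =====
theorem DivisibleBy4_spec : Claim_equal_DivisibleBy4 := by
  intro n _
  unfold Spec_DivisibleBy4 DivisibleBy4 DivisibleBy4_alt
  have hrange : PySem.List.pyRange 0 2 1 = [0, 1] := by decide
  set q1 := PySem.Int.floordiv n 10 with hq1
  set r1 := PySem.Int.mod n 10 with hr1
  set r2 := PySem.Int.mod q1 10 with hr2
  have hr10 : 0 ≤ r1 := PySem.Int.mod_nonneg n (by norm_num)
  have hr11 : r1 < 10 := PySem.Int.mod_lt n (by norm_num)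
  have hr20 : 0 ≤ r2 := PySem.Int.mod_nonneg q1 (by norm_num)
  have hr21 : r2 < 10 := PySem.Int.mod_lt q1 (by norm_num)
  have hparse := pv_parse_two r2 r1 hr20 hr21 hr10 hr11
  have h1 : q1 * 10 + r1 = n := PySem.Int.floordiv_mul_add_mod n 10
  have h2 : PySem.Int.floordiv q1 10 * 10 + r2 = q1 := PySem.Int.floordiv_mul_add_mod q1 10
  have hmod : PySem.Int.mod (r2 * 10 + r1) 4 = 0 ↔ PySem.Int.mod n 4 = 0 := by
    rw [PySem.Int.mod_eq_zero_iff_dvd, PySem.Int.mod_eq_zero_iff_dvd]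
    omega
  simp only [hrange, List.foldl, List.nil_append, List.reverse_cons, List.reverse_nil,
    List.cons_append]
  rw [hparse]
  have hm4 : PySem.Int.mod n 4 = n % 4 := PySem.Int.mod_eq_emod_of_pos (by norm_num)
  have key : (4 ∣ r2 * 10 + r1) ↔ n % 4 = 0 := by
    rw [← PySem.Int.mod_eq_zero_iff_dvd, hmod, hm4]
  by_cases h : n % 4 = 0
  · simp [key.mpr h, h]
  · have hnd : ¬ (4 ∣ r2 * 10 + r1) := fun hc => h (key.mp hc)
    simp [hnd, h]
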